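-- pv_equiv track=rewrite | github.com/JoeyDiMart/Theory-Of-Computation | FSM1.py | machine
-- ===== SOURCE A (Python) =====
-- def machine(s):
--     state = "A"
--     '''
--     for i in s:
--         if state == "A" and i == "1":
--             state = "B"
--         if state == "B" and i == "0":
--             state = "A"
--     '''
--     for i in s:
--         match state, i:
--             case "A", "1":
--                 state = "B"
--             case "B", "0":
--                 state = "A"
--
--
--     return "accepted" if state == "B" else "Denied"
-- ===== SOURCE B (Python) =====
-- def machine(s):
--     for c in reversed(s):
--         if c == "1":
--             return "accepted"
--         if c == "0":
--             return "Denied"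
--     return "Denied"
-- ===== Notes on version B (the rewrite author's own statement) =====
-- stated objective: simpler
-- what changed: Replaces the forward two-state FSM simulation with a reverse scan that returns at the first significant digit character seen from the end, since that character alone determines acceptance.
import Mathlib
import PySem

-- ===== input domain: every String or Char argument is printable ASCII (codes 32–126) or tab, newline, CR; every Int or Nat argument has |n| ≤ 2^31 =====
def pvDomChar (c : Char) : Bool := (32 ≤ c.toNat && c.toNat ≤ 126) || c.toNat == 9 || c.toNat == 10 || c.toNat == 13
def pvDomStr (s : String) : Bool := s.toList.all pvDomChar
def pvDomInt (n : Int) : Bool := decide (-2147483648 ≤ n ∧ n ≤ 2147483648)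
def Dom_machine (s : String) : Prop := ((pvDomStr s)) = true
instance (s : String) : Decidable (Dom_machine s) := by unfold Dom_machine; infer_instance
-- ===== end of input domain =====

-- B replaces the forward two-state simulation with a reverse early-exit scan for the last '0'/'1' (objective: simpler).

-- ===== PORT A =====
-- one match-step of A's loop: first matching case wins, otherwise state unchanged
def machineStep (state : String) (i : Char) : String :=
  if state = "A" ∧ i = '1' then "B"
  else if state = "B" ∧ i = '0' then "A"
  else state

def machine (s : String) : String :=
  let state := s.toList.foldl machineStep "A"
  if state = "B" then "accepted" else "Denied"

-- ===== PORT B =====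
-- scan the reversed character list, returning at the first '1' or '0'
def machineAltGo : List Char → String
  | [] => "Denied"
  | c :: rest => if c = '1' then "accepted" else if c = '0' then "Denied" else machineAltGo rest

def machine_alt (s : String) : String := machineAltGo s.toList.reverse

-- ===== PRECONDITION & SPEC =====
def Spec_machine (s : String) (out : String) : Prop := out = machine_alt s
instance (s : String) (out : String) : Decidable (Spec_machine s out) := by unfold Spec_machine; infer_instance

-- ===== CLAIM (what is proved, stated in full; the proofs are below) =====
def Claim_equal_machine : Prop := ∀ (s : String), Dom_machine s → Spec_machine s (machine s)

-- ===== LEMMAS AND PROOFS =====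

-- the reverse scan with an explicit 'no 0/1 found' outcome
def machineAltGoOpt : List Char → Option String
  | [] => none
  | c :: rest => if c = '1' then some "accepted" else if c = '0' then some "Denied"
      else machineAltGoOpt rest

theorem machineAltGo_eq_opt (l : List Char) :
    machineAltGo l = (machineAltGoOpt l).getD "Denied" := by
  induction l with
  | nil => rfl
  | cons c rest ih =>
      simp only [machineAltGo, machineAltGoOpt]
      split_ifs <;> simp [ih]

-- the FSM state stays in {"A","B"}
theorem machine_state_inv (l : List Char) (st : String) (h : st = "A" ∨ st = "B") :
    l.foldl machineStep st = "A" ∨ l.foldl machineStep st = "B" := by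
  induction l generalizing st with
  | nil => simpa using h
  | cons c rest ih =>
      apply ih
      rcases h with h | h <;> subst h <;> simp [machineStep] <;> tauto

-- acceptance of the folded state equals the reverse scan, falling back to the
-- verdict on the starting state when no '0'/'1' occurs
theorem machine_fold_rev (l : List Char) (st : String) (h : st = "A" ∨ st = "B") :
    (if l.foldl machineStep st = "B" then "accepted" else "Denied")
      = (machineAltGoOpt l.reverse).getD (if st = "B" then "accepted" else "Denied") := by
  induction l using List.reverseRecOn generalizing st with
  | nil => simp [machineAltGoOpt]
  | append_singleton l c ih =>
      have hst := machine_state_inv l st h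
      rw [List.foldl_append]
      simp only [List.foldl_cons, List.foldl_nil, List.reverse_append, List.reverse_cons,
        List.reverse_nil, List.nil_append, List.cons_append, machineAltGoOpt]
      by_cases h1 : c = '1'
      · subst h1
        rcases hst with hs | hs <;> simp [machineStep, hs]
      · by_cases h0 : c = '0'
        · subst h0
          rcases hst with hs | hs <;> simp [machineStep, hs]
        · have hstep : machineStep (l.foldl machineStep st) c = l.foldl machineStep st := by
            rcases hst with hs | hs <;> simp [machineStep, hs, h1, h0]
          simp only [hstep, h1, h0, if_false]
          exact ih st h

-- ===== VERDICT (by name: the statement is the Claim_ definition above) =====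
theorem machine_spec : Claim_equal_machine := by
  intro s _
  unfold Spec_machine machine machine_alt
  have := machine_fold_rev s.toList "A" (Or.inl rfl)
  simp only [this, machineAltGo_eq_opt]
  cases machineAltGoOpt s.toList.reverse <;> simp
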